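-- pv_equiv track=rewrite | github.com/Injenia/TextExtraction-GooglePartnerSpec | lib/extract_parts.py | join_cognomi_articles
-- ===== SOURCE A (Python) =====
-- def join_cognomi_articles(words):
--     articles = set([u'de', u'di', u'du', u'del', u'dell', u'la', u'dei', u'le',
--                     u'della', u'dall', u'dalla', u'dello', 'degli', 'lo', 'art',
--                    u'dal', u'dalle'])
--     found = False
--     joined_words = []
--     for word in words:
--         if not found and word.lower() in articles:
--             found = True
--             cur_word = word
--         elif found:
--             cur_word += ' '+word
--             joined_words.append(cur_word)
--             found = False
--         else:
--             joined_words.append(word)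
--     return joined_words
-- ===== SOURCE B (Python) =====
-- def join_cognomi_articles(words):
--     articles = set([u'de', u'di', u'du', u'del', u'dell', u'la', u'dei', u'le',
--                     u'della', u'dall', u'dalla', u'dello', 'degli', 'lo', 'art',
--                     u'dal', u'dalle'])
--     out = []
--     i = 0
--     n = len(words)
--     while i < n:
--         w = words[i]
--         if w.lower() in articles:
--             if i + 1 < n:
--                 out.append(w + ' ' + words[i + 1])
--                 i += 2
--             else:
--                 i += 1  # trailing article: nothing to join, dropped
--         else:
--             out.append(w)
--             i += 1
--     return out
-- ===== Notes on version B (the rewrite author's own statement) =====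
-- stated objective: simpler
-- what changed: Replaces the found/cur_word per-element state machine by an index loop that consumes an article together with its following word in one step (look-ahead), with no carried flag state.
import Mathlib
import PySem

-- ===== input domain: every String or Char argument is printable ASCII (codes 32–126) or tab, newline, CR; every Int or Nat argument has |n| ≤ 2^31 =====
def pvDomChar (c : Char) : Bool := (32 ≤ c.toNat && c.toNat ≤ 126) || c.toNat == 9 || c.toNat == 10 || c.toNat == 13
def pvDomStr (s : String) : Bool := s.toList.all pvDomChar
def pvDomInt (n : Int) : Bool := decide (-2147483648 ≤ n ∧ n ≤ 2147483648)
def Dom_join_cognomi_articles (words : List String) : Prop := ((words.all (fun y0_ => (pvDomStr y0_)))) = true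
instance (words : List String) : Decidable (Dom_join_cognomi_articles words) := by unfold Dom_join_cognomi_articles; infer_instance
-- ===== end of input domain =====

-- B replaces A's found/cur_word state machine with a look-ahead recursion that consumes
-- an article and its following word in one step (objective: simpler decomposition).


-- ===== PORT A =====
-- the 'articles' set literal shared by both Pythons
def pvArticles : PySem.Set String :=
  PySem.Set.ofList ["de", "di", "du", "del", "dell", "la", "dei", "le",
                    "della", "dall", "dalla", "dello", "degli", "lo", "art",
                    "dal", "dalle"]

-- A's loop body: state = (found-as-Option cur_word, joined_words)
def pvStepA (st : Option String × List String) (word : String) : Option String × List String :=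
  match st.1 with
  | none =>
      if PySem.Set.contains pvArticles (PySem.Str.lower word) then (some word, st.2)
      else (none, st.2 ++ [word])
  | some cur => (none, st.2 ++ [cur ++ " " ++ word])

def join_cognomi_articles (words : List String) : List String :=
  (words.foldl pvStepA (none, [])).2

-- ===== PORT B =====
def join_cognomi_articles_alt (words : List String) : List String :=
  match words with
  | [] => []
  | [w] => if PySem.Set.contains pvArticles (PySem.Str.lower w) then [] else [w]
  | w :: y :: rest =>
      if PySem.Set.contains pvArticles (PySem.Str.lower w) then
        (w ++ " " ++ y) :: join_cognomi_articles_alt rest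
      else
        w :: join_cognomi_articles_alt (y :: rest)

-- ===== PRECONDITION & SPEC =====
def Spec_join_cognomi_articles (words : List String) (out : List String) : Prop := out = join_cognomi_articles_alt words
instance (words : List String) (out : List String) : Decidable (Spec_join_cognomi_articles words out) := by unfold Spec_join_cognomi_articles; infer_instance

-- ===== CLAIM (what is proved, stated in full; the proofs are below) =====
def Claim_equal_join_cognomi_articles : Prop := ∀ (words : List String), Dom_join_cognomi_articles words → Spec_join_cognomi_articles words (join_cognomi_articles words)

-- ===== LEMMAS AND PROOFS =====

-- what A's fold produces from the 'found' state: the pending article is joined to the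
-- very next word unconditionally, or dropped if the list ends
def pvPend (c : String) (ws : List String) : List String :=
  match ws with
  | [] => []
  | x :: rest => (c ++ " " ++ x) :: join_cognomi_articles_alt rest

theorem pvFold_key (ws : List String) :
    (∀ acc, (ws.foldl pvStepA (none, acc)).2 = acc ++ join_cognomi_articles_alt ws) ∧
    (∀ c acc, (ws.foldl pvStepA (some c, acc)).2 = acc ++ pvPend c ws) := by
  induction ws with
  | nil => simp [join_cognomi_articles_alt, pvPend]
  | cons x rest ih =>
    constructor
    · intro acc
      by_cases h : PySem.Set.contains pvArticles (PySem.Str.lower x) = true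
      · rw [List.foldl_cons]
        simp only [pvStepA, h, if_pos]
        rw [ih.2 x acc]
        cases rest with
        | nil => simp only [pvPend, join_cognomi_articles_alt]; rw [if_pos h]
        | cons y r => simp only [pvPend, join_cognomi_articles_alt]; rw [if_pos h]
      · rw [List.foldl_cons]
        simp only [pvStepA, h, if_neg, Bool.false_eq_true, not_false_iff]
        rw [ih.1 (acc ++ [x])]
        cases rest with
        | nil => simp only [join_cognomi_articles_alt]; rw [if_neg h]; simp
        | cons y r => simp only [join_cognomi_articles_alt]; rw [if_neg h]; simp
    · intro c acc
      rw [List.foldl_cons]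
      simp only [pvStepA]
      rw [ih.1 (acc ++ [c ++ " " ++ x])]
      simp [pvPend]

-- ===== VERDICT (by name: the statement is the Claim_ definition above) =====
theorem join_cognomi_articles_spec : Claim_equal_join_cognomi_articles := by
  intro words _
  show (words.foldl pvStepA (none, [])).2 = join_cognomi_articles_alt words
  simpa using (pvFold_key words).1 []
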